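-- pv_equiv track=rewrite | github.com/henr1quess/trade_helper | generate_item_name_map.py | build_item_name_map
-- ===== SOURCE A (Python) =====
-- from typing import Any, Dict, Iterable, Tuple
--
-- def build_item_name_map(records: Iterable[Dict[str, Any]]) -> Tuple[Dict[str, str], Dict[str, set[str]]]:
--     """Return the item_id -> item_name mapping and track conflicting names."""
--     mapping: Dict[str, str] = {}
--     conflicts: Dict[str, set[str]] = {}
--
--     for entry in records:
--         if not isinstance(entry, dict):
--             continue
--         item_id = entry.get("item_id")
--         item_name = entry.get("item_name")
--         if not item_id or not item_name:
--             continue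
--         existing = mapping.get(item_id)
--         if existing and existing != item_name:
--             conflicts.setdefault(item_id, {existing}).add(item_name)
--         else:
--             mapping[item_id] = item_name
--
--     return mapping, conflicts
-- ===== SOURCE B (Python) =====
-- from typing import Any, Dict, Iterable, Tuple
--
-- def build_item_name_map(records: Iterable[Dict[str, Any]]) -> Tuple[Dict[str, str], Dict[str, set[str]]]:
--     """Group names per item_id in one pass, then derive mapping and conflicts."""
--     groups: Dict[str, list] = {}
--     conflict_order: list = []
--     for entry in records:
--         if not isinstance(entry, dict):
--             continue
--         item_id = entry.get("item_id")
--         item_name = entry.get("item_name")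
--         if not item_id or not item_name:
--             continue
--         names = groups.setdefault(item_id, [])
--         if names and item_name != names[0] and item_id not in conflict_order:
--             conflict_order.append(item_id)
--         names.append(item_name)
--     mapping = {iid: names[0] for iid, names in groups.items()}
--     conflicts = {iid: set(groups[iid]) for iid in conflict_order}
--     return mapping, conflicts
-- ===== Notes on version B (the rewrite author's own statement) =====
-- stated objective: alternative
-- what changed: Instead of interleaving mapping/conflict updates per record, B makes one grouping pass that collects the ordered list of names per item_id (plus the order in which conflicts first appear) and then derives both the mapping (first name per id) and the conflicts dict (distinct-name set per conflicting id) from the groups.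
import Mathlib
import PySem

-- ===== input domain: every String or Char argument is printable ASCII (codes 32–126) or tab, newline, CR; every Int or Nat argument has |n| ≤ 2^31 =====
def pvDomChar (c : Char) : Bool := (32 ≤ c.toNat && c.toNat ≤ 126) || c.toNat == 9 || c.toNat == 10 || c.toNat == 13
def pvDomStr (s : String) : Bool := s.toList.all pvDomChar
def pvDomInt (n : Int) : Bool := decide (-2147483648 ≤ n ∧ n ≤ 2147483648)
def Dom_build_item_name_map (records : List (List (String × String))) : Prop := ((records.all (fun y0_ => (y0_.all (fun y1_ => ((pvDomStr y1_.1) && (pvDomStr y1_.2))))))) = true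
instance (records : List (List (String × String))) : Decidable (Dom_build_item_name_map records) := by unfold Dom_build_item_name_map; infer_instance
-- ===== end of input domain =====

-- B replaces A's interleaved mapping/conflict updates by a grouping pass (names per id, plus the
-- order in which conflicts first appear) followed by a derivation of both dicts from the groups;
-- objective: alternative decomposition, same asymptotic cost. Return-value equivalence only.

-- ===== PORT A =====
-- entry.get(k) on a dict-as-assoc-list: first match, None → modelled by getD "" since
-- both None and "" are falsy and the value is only used through its truthiness/equality.
def pvStepA (st : PySem.Dict String String × PySem.Dict String (PySem.Set String))
    (entry : List (String × String)) :
    PySem.Dict String String × PySem.Dict String (PySem.Set String) :=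
  let item_id := (List.lookup "item_id" entry).getD ""
  let item_name := (List.lookup "item_name" entry).getD ""
  if item_id = "" ∨ item_name = "" then st
  else
    let existing := st.1.getD item_id ""
    if existing ≠ "" ∧ existing ≠ item_name then
      -- conflicts.setdefault(item_id, {existing}).add(item_name)
      (st.1, (st.2.setdefault item_id (PySem.Set.ofList [existing])).modify item_id
               PySem.Set.empty (fun s => s.add item_name))
    else
      (st.1.insert item_id item_name, st.2)

def build_item_name_map (records : List (List (String × String))) :
    (List (String × String)) × (List (String × List String)) :=
  let r := records.foldl pvStepA (PySem.Dict.empty, PySem.Dict.empty)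
  (r.1.items, r.2.items)

-- ===== PORT B =====
def pvStepB (st : PySem.Dict String (List String) × List String)
    (entry : List (String × String)) :
    PySem.Dict String (List String) × List String :=
  let item_id := (List.lookup "item_id" entry).getD ""
  let item_name := (List.lookup "item_name" entry).getD ""
  if item_id = "" ∨ item_name = "" then st
  else
    let names := st.1.getD item_id []
    let co := if names ≠ [] ∧ item_name ≠ names.headD "" ∧ item_id ∉ st.2
              then st.2 ++ [item_id] else st.2
    -- groups.setdefault(item_id, []).append(item_name)
    (st.1.modify item_id [] (fun ns => ns ++ [item_name]), co)

def build_item_name_map_alt (records : List (List (String × String))) :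
    (List (String × String)) × (List (String × List String)) :=
  let r := records.foldl pvStepB (PySem.Dict.empty, [])
  -- names[0] / groups[iid]: the loop guarantees every group is nonempty and every
  -- id in conflict_order is a key of groups, so headD "" / getD [] are exact here.
  (r.1.items.map (fun p => (p.1, p.2.headD "")),
   r.2.map (fun iid => (iid, PySem.Set.ofList (r.1.getD iid []))))

-- ===== PRECONDITION & SPEC =====
def Spec_build_item_name_map (records : List (List (String × String))) (out : (List (String × String)) × (List (String × List String))) : Prop := out = build_item_name_map_alt records
instance (records : List (List (String × String))) (out : (List (String × String)) × (List (String × List String))) : Decidable (Spec_build_item_name_map records out) := by unfold Spec_build_item_name_map; infer_instance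

-- ===== CLAIM (what is proved, stated in full; the proofs are below) =====
def Claim_equal_build_item_name_map : Prop := ∀ (records : List (List (String × String))), Dom_build_item_name_map records → Spec_build_item_name_map records (build_item_name_map records)

-- ===== LEMMAS AND PROOFS =====

-- The simulation invariant between B's state (g, co) and A's state (m, c).
def pvInv (g : PySem.Dict String (List String)) (co : List String)
    (m : PySem.Dict String String) (c : PySem.Dict String (PySem.Set String)) : Prop :=
  g.keys.Nodup ∧ co.Nodup ∧
  m.items = g.items.map (fun p => (p.1, p.2.headD "")) ∧
  c.items = co.map (fun k => (k, PySem.Set.ofList (g.getD k []))) ∧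
  (∀ k ∈ co, g.contains k = true) ∧
  (∀ p ∈ g.items, p.2 ≠ [] ∧ p.2.headD "" ≠ "") ∧
  (∀ p ∈ g.items, p.1 ∉ co → ∀ n ∈ p.2, n = p.2.headD "")

theorem pv_list_singleton {α : Type} {l : List α} {e : α} (hne : l ≠ [])
    (hnd : l.Nodup) (h : ∀ x ∈ l, x = e) : l = [e] := by
  cases l with
  | nil => exact absurd rfl hne
  | cons a t =>
    have ha : a = e := h a (by simp)
    subst ha
    cases t with
    | nil => rfl
    | cons b t' =>
      have hb : b = a := h b (by simp)
      simp [hb] at hnd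

theorem pv_headD_mem {l : List String} (h : l ≠ []) : l.headD "" ∈ l := by
  cases l with
  | nil => exact absurd rfl h
  | cons a t => simp


theorem pv_headD_append {l : List String} (x : String) (h : l ≠ []) :
    (l ++ [x]).headD "" = l.headD "" := by
  cases l with
  | nil => exact absurd rfl h
  | cons a t => rfl

-- step preservation
theorem pvInv_step (g : PySem.Dict String (List String)) (co : List String)
    (m : PySem.Dict String String) (c : PySem.Dict String (PySem.Set String))
    (e : List (String × String)) (h : pvInv g co m c) :
    pvInv (pvStepB (g, co) e).1 (pvStepB (g, co) e).2
          (pvStepA (m, c) e).1 (pvStepA (m, c) e).2 := by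
  obtain ⟨hndg, hndco, hm, hc, hco, hval, hpure⟩ := h
  simp only [pvStepA, pvStepB]
  generalize (List.lookup "item_id" e).getD "" = iid
  generalize (List.lookup "item_name" e).getD "" = nm
  by_cases hskip : iid = "" ∨ nm = ""
  · rw [if_pos hskip, if_pos hskip]
    exact ⟨hndg, hndco, hm, hc, hco, hval, hpure⟩
  rw [if_neg hskip, if_neg hskip]
  have hnme : nm ≠ "" := fun hh => hskip (Or.inr hh)
  dsimp only
  have hmdf : g.modify iid [] (fun l => l ++ [nm]) = g.insert iid (g.getD iid [] ++ [nm]) := rfl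
  rw [hmdf]
  -- basic facts
  have hkeysm : m.keys = g.keys := by
    have h1 : m.keys = m.items.map Prod.fst := rfl
    have h2 : g.keys = g.items.map Prod.fst := rfl
    rw [h1, h2, hm, List.map_map]
    rfl
  have hckeys : c.keys = co := by
    have h1 : c.keys = c.items.map Prod.fst := rfl
    rw [h1, hc, List.map_map]
    simp [Function.comp_def]
  have hndm : m.keys.Nodup := hkeysm ▸ hndg
  have hndc : c.keys.Nodup := hckeys ▸ hndco
  have hmc_eq : ∀ k, m.contains k = g.contains k := by
    intro k
    rw [PySem.Dict.contains_eq_decide_mem_keys, PySem.Dict.contains_eq_decide_mem_keys, hkeysm]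
  by_cases hgc : g.contains iid = true
  · -- iid is a key of g: get its value ns
    have hsome : ∃ v, g.get? iid = some v := by
      have hiso := PySem.Dict.contains_eq_isSome_get? (d := g) (k := iid)
      rw [hgc] at hiso
      cases hv : g.get? iid with
      | none => rw [hv] at hiso; simp at hiso
      | some v => exact ⟨v, rfl⟩
    obtain ⟨ns, hns⟩ := hsome
    have hgd : g.getD iid [] = ns := PySem.Dict.getD_of_get?_eq_some _ _ hns
    have hmemg : (iid, ns) ∈ g.items := PySem.Dict.mem_items_of_get?_eq_some _ hns
    have hns_ne : ns ≠ [] := (hval _ hmemg).1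
    have hex_ne : ns.headD "" ≠ "" := (hval _ hmemg).2
    have hmgd : m.getD iid "" = ns.headD "" := by
      have hmemm : (iid, ns.headD "") ∈ m.items := by
        rw [hm]; exact List.mem_map_of_mem hmemg
      exact PySem.Dict.getD_of_mem_items _ hmemm hndm ""
    rw [hgd, hmgd]
    have hmc : m.contains iid = true := by rw [hmc_eq]; exact hgc
    by_cases hnmex : ns.headD "" = nm
    · -- C2: same name as the first one: A re-inserts, no conflict
      rw [if_neg (show ¬(ns ≠ [] ∧ nm ≠ ns.headD "" ∧ iid ∉ co) from
            fun hcon => hcon.2.1 hnmex.symm),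
          if_neg (show ¬(ns.headD "" ≠ "" ∧ ns.headD "" ≠ nm) from fun hcon => hcon.2 hnmex)]
      refine ⟨PySem.Dict.nodup_keys_insert _ _ _ hndg, hndco, ?_, ?_, ?_, ?_, ?_⟩
      · -- mapping items
        rw [PySem.Dict.items_insert_of_contains _ _ hmc,
            PySem.Dict.items_insert_of_contains _ _ hgc, hm, List.map_map, List.map_map]
        apply List.map_congr_left
        intro p hp
        by_cases hpk : p.1 = iid
        · obtain ⟨x, t, rfl⟩ := List.exists_cons_of_ne_nil hns_ne
          have hx : x = nm := by simpa using hnmex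
          simp [Function.comp, hpk, hx]
        · simp [Function.comp, hpk]
      · -- conflicts items
        rw [hc]
        apply List.map_congr_left
        intro k hk
        by_cases hkiid : k = iid
        · subst hkiid
          have hmemnm : nm ∈ PySem.Set.ofList ns :=
            (PySem.Set.mem_ofList ns nm).2 (hnmex ▸ pv_headD_mem hns_ne)
          rw [PySem.Dict.getD_insert_self, hgd, PySem.Set.ofList_append_singleton,
              PySem.Set.add_of_mem hmemnm]
        · rw [PySem.Dict.getD_insert, if_neg hkiid]
      · intro k hk
        rw [PySem.Dict.contains_insert]
        simp only [Bool.or_eq_true, beq_iff_eq]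
        exact Or.inr (hco k hk)
      · intro p hp
        rw [PySem.Dict.items_insert_of_contains _ _ hgc] at hp
        obtain ⟨q, hq, hqe⟩ := List.mem_map.1 hp
        by_cases hqk : q.1 = iid
        · rw [← hqe]
          simp only [hqk, beq_self_eq_true, if_true]
          exact ⟨by simp, by rw [pv_headD_append nm hns_ne]; exact hex_ne⟩
        · rw [← hqe]
          simp only [beq_iff_eq, hqk, if_false]
          exact hval _ hq
      · intro p hp hpco
        rw [PySem.Dict.items_insert_of_contains _ _ hgc] at hp
        obtain ⟨q, hq, hqe⟩ := List.mem_map.1 hp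
        by_cases hqk : q.1 = iid
        · rw [← hqe] at hpco ⊢
          simp only [hqk, beq_self_eq_true, if_true] at hpco ⊢
          intro n hn
          rw [pv_headD_append nm hns_ne]
          rcases List.mem_append.1 hn with hn | hn
          · exact hpure (iid, ns) hmemg hpco n hn
          · simp only [List.mem_singleton] at hn
            rw [hn, ← hnmex]
        · rw [← hqe] at hpco ⊢
          simp only [beq_iff_eq, hqk, if_false] at hpco ⊢
          exact hpure _ hq hpco
    · -- C3: a different name: A records a conflict, mapping unchanged
      rw [if_pos (show ns.headD "" ≠ "" ∧ ns.headD "" ≠ nm from ⟨hex_ne, hnmex⟩)]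
      have hcmdf : ∀ (d : PySem.Dict String (PySem.Set String)),
          d.modify iid PySem.Set.empty (fun s => s.add nm)
            = d.insert iid ((d.getD iid PySem.Set.empty).add nm) := fun _ => rfl
      have hmap_eq : m.items = (g.insert iid (ns ++ [nm])).items.map
          (fun p => (p.1, p.2.headD "")) := by
        rw [PySem.Dict.items_insert_of_contains _ _ hgc, List.map_map, hm]
        apply List.map_congr_left
        intro p hp
        by_cases hpk : p.1 = iid
        · have hget : g.get? p.1 = some p.2 := PySem.Dict.get?_of_mem_items _ hp hndg
          rw [hpk, hns] at hget
          have hp2 : p.2 = ns := by injection hget.symm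
          obtain ⟨x, t, rfl⟩ := List.exists_cons_of_ne_nil hns_ne
          simp [Function.comp, hpk, hp2]
        · simp [Function.comp, hpk]
      have hval' : ∀ p ∈ (g.insert iid (ns ++ [nm])).items, p.2 ≠ [] ∧ p.2.headD "" ≠ "" := by
        intro p hp
        rw [PySem.Dict.items_insert_of_contains _ _ hgc] at hp
        obtain ⟨q, hq, hqe⟩ := List.mem_map.1 hp
        by_cases hqk : q.1 = iid
        · rw [← hqe]
          simp only [hqk, beq_self_eq_true, if_true]
          exact ⟨by simp, by rw [pv_headD_append nm hns_ne]; exact hex_ne⟩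
        · rw [← hqe]
          simp only [beq_iff_eq, hqk, if_false]
          exact hval _ hq
      have hcontains' : ∀ k ∈ co, (g.insert iid (ns ++ [nm])).contains k = true := by
        intro k hk
        rw [PySem.Dict.contains_insert]
        simp only [Bool.or_eq_true, beq_iff_eq]
        exact Or.inr (hco k hk)
      by_cases hmemco : iid ∈ co
      · -- C3b: conflict already recorded
        rw [if_neg (show ¬(ns ≠ [] ∧ nm ≠ ns.headD "" ∧ iid ∉ co) from
              fun hcon => hcon.2.2 hmemco)]
        have hcc : c.contains iid = true := by
          rw [PySem.Dict.contains_eq_decide_mem_keys, hckeys]; simp [hmemco]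
        rw [PySem.Dict.setdefault_of_contains _ _ hcc, hcmdf]
        have hcgd : c.getD iid PySem.Set.empty = PySem.Set.ofList ns := by
          have hmemc : (iid, PySem.Set.ofList (g.getD iid [])) ∈ c.items := by
            rw [hc]; exact List.mem_map_of_mem hmemco
          rw [hgd] at hmemc
          exact PySem.Dict.getD_of_mem_items _ hmemc hndc _
        refine ⟨PySem.Dict.nodup_keys_insert _ _ _ hndg, hndco, hmap_eq, ?_, hcontains', hval', ?_⟩
        · rw [PySem.Dict.items_insert_of_contains _ _ hcc, hc, List.map_map]
          apply List.map_congr_left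
          intro k hk
          by_cases hkiid : k = iid
          · subst hkiid
            simp only [Function.comp_apply, beq_self_eq_true, if_true]
            rw [PySem.Dict.getD_insert_self, hcgd, PySem.Set.ofList_append_singleton]
          · simp only [Function.comp_apply, beq_iff_eq, hkiid, if_false]
            rw [PySem.Dict.getD_insert, if_neg hkiid]
        · intro p hp hpco
          rw [PySem.Dict.items_insert_of_contains _ _ hgc] at hp
          obtain ⟨q, hq, hqe⟩ := List.mem_map.1 hp
          by_cases hqk : q.1 = iid
          · rw [← hqe] at hpco
            simp only [hqk, beq_self_eq_true, if_true] at hpco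
            exact absurd hmemco hpco
          · rw [← hqe] at hpco ⊢
            simp only [beq_iff_eq, hqk, if_false] at hpco ⊢
            exact hpure _ hq hpco
      · -- C3a: first conflict for this id
        rw [if_pos (show ns ≠ [] ∧ nm ≠ ns.headD "" ∧ iid ∉ co from
              ⟨hns_ne, fun hh => hnmex hh.symm, hmemco⟩)]
        have hcc : c.contains iid = false := by
          rw [PySem.Dict.contains_eq_decide_mem_keys, hckeys]; simp [hmemco]
        rw [PySem.Dict.setdefault_of_not_contains _ _ hcc, hcmdf,
            PySem.Dict.getD_insert_self, PySem.Dict.insert_insert_self]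
        have hofl : PySem.Set.ofList ns = [ns.headD ""] := by
          apply pv_list_singleton
          · intro hh
            have hmem := (PySem.Set.mem_ofList ns (ns.headD "")).2 (pv_headD_mem hns_ne)
            rw [hh] at hmem; simp at hmem
          · exact PySem.Set.nodup_ofList ns
          · intro x hx
            exact hpure (iid, ns) hmemg hmemco x ((PySem.Set.mem_ofList ns x).1 hx)
        have haddv : (PySem.Set.ofList [ns.headD ""]).add nm = [ns.headD "", nm] := by
          have hs : PySem.Set.ofList [ns.headD ""] = [ns.headD ""] := rfl
          rw [hs, PySem.Set.add_of_not_mem (by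
            intro hh
            simp only [List.mem_singleton] at hh
            exact hnmex hh.symm)]
          simp
        have hofl2 : PySem.Set.ofList (ns ++ [nm]) = [ns.headD "", nm] := by
          rw [PySem.Set.ofList_append_singleton, hofl]
          rw [PySem.Set.add_of_not_mem (by
            intro hh
            simp only [List.mem_singleton] at hh
            exact hnmex hh.symm)]
          simp
        refine ⟨PySem.Dict.nodup_keys_insert _ _ _ hndg, ?_, hmap_eq, ?_, ?_, hval', ?_⟩
        · simp [List.nodup_append, hndco]
          intro a ha hai
          exact hmemco (hai ▸ ha)
        · rw [PySem.Dict.items_insert_of_not_contains _ _ hcc, hc, List.map_append]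
          congr 1
          · apply List.map_congr_left
            intro k hk
            have hkiid : k ≠ iid := fun hh => hmemco (hh ▸ hk)
            rw [PySem.Dict.getD_insert, if_neg hkiid]
          · simp only [List.map_cons, List.map_nil]
            rw [PySem.Dict.getD_insert_self, hofl2, haddv]
        · intro k hk
          rcases List.mem_append.1 hk with hk | hk
          · exact hcontains' k hk
          · simp only [List.mem_singleton] at hk
            rw [hk, PySem.Dict.contains_insert]
            simp
        · intro p hp hpco
          rw [PySem.Dict.items_insert_of_contains _ _ hgc] at hp
          obtain ⟨q, hq, hqe⟩ := List.mem_map.1 hp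
          by_cases hqk : q.1 = iid
          · rw [← hqe] at hpco
            simp only [hqk, beq_self_eq_true, if_true] at hpco
            simp at hpco
          · rw [← hqe] at hpco ⊢
            simp only [beq_iff_eq, hqk, if_false] at hpco ⊢
            exact hpure _ hq (fun hh => hpco (List.mem_append_left _ hh))
  · -- C1: iid is fresh
    have hgcf : g.contains iid = false := Bool.eq_false_iff.mpr hgc
    have hgd : g.getD iid [] = [] := PySem.Dict.getD_of_not_contains _ _ hgcf
    have hmgd : m.getD iid "" = "" := by
      apply PySem.Dict.getD_of_not_contains
      rw [hmc_eq]; exact hgcf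
    rw [hgd, hmgd]
    rw [if_neg (show ¬(([] : List String) ≠ [] ∧ nm ≠ ([] : List String).headD "" ∧ iid ∉ co)
          from fun hcon => hcon.1 rfl),
        if_neg (show ¬(("" : String) ≠ "" ∧ ("" : String) ≠ nm) from fun hcon => hcon.1 rfl)]
    have hmcf : m.contains iid = false := by rw [hmc_eq]; exact hgcf
    refine ⟨PySem.Dict.nodup_keys_insert _ _ _ hndg, hndco, ?_, ?_, ?_, ?_, ?_⟩
    · rw [PySem.Dict.items_insert_of_not_contains _ _ hmcf,
          PySem.Dict.items_insert_of_not_contains _ _ hgcf, List.map_append, hm]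
      rfl
    · rw [hc]
      apply List.map_congr_left
      intro k hk
      have hkiid : k ≠ iid := by
        intro hh
        have h2 := hco k hk
        rw [hh, hgcf] at h2
        exact Bool.false_ne_true h2
      rw [PySem.Dict.getD_insert, if_neg hkiid]
    · intro k hk
      rw [PySem.Dict.contains_insert]
      simp only [Bool.or_eq_true, beq_iff_eq]
      exact Or.inr (hco k hk)
    · intro p hp
      rw [PySem.Dict.items_insert_of_not_contains _ _ hgcf] at hp
      rcases List.mem_append.1 hp with hp | hp
      · exact hval _ hp
      · simp only [List.mem_singleton] at hp
        rw [hp]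
        exact ⟨by simp, by simpa using hnme⟩
    · intro p hp hpco
      rw [PySem.Dict.items_insert_of_not_contains _ _ hgcf] at hp
      rcases List.mem_append.1 hp with hp | hp
      · exact hpure _ hp hpco
      · simp only [List.mem_singleton] at hp
        rw [hp]
        intro n hn
        simpa using hn

theorem pvInv_fold (records : List (List (String × String)))
    (g : PySem.Dict String (List String)) (co : List String)
    (m : PySem.Dict String String) (c : PySem.Dict String (PySem.Set String))
    (h : pvInv g co m c) :
    pvInv (records.foldl pvStepB (g, co)).1 (records.foldl pvStepB (g, co)).2
          (records.foldl pvStepA (m, c)).1 (records.foldl pvStepA (m, c)).2 := by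
  induction records generalizing g co m c with
  | nil => exact h
  | cons e rest ih =>
    have h' := pvInv_step g co m c e h
    simpa using ih _ _ _ _ h'

-- ===== VERDICT (by name: the statement is the Claim_ definition above) =====
theorem build_item_name_map_spec : Claim_equal_build_item_name_map := by
  intro records _
  unfold Spec_build_item_name_map build_item_name_map build_item_name_map_alt
  have h0 : pvInv PySem.Dict.empty [] PySem.Dict.empty PySem.Dict.empty := by
    refine ⟨PySem.Dict.nodup_keys_empty, List.nodup_nil, rfl, rfl, by simp, ?_, ?_⟩ <;>
      · intro p hp; simp [PySem.Dict.empty] at hp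
  have h := pvInv_fold records PySem.Dict.empty [] PySem.Dict.empty PySem.Dict.empty h0
  obtain ⟨-, -, hm, hc, -, -, -⟩ := h
  simp only []
  exact Prod.ext (by simpa using hm) (by simpa using hc)
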